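-- pv_equiv track=rewrite | github.com/hconanb/bddk | old_analysis/2020_run/old_studies/bkg_study/peak_bkg_study.py | build_track_strings
-- ===== SOURCE A (Python) =====
-- def build_track_strings(tl, n, tag):
--     name_list = []
--     form_list = []
--     if n == 2:
--         for i in tl :
--             t1 = i[0]
--             t2 = i[1]
--             name = f"{t1}_{t2}_M_{tag}"
--             form = f"sqrt( pow({t1}_PE + {t2}_PE, 2) - ( pow({t1}_PX + {t2}_PX,2) + pow({t1}_PY + {t2}_PY, 2) + pow({t1}_PZ + {t2}_PZ,2)))"
--             name_list.append(name)
--             form_list.append(form)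
--     if n == 3:
--         for i in tl :
--             t1 = i[0]
--             t2 = i[1]
--             t3 = i[2]
--             name = f"{t1}_{t2}_{t3}_M_{tag}"
--             form = f"sqrt( pow({t1}_PE + {t2}_PE + {t3}_PE, 2) - ( pow({t1}_PX + {t2}_PX + {t3}_PX,2) + pow({t1}_PY + {t2}_PY + {t3}_PY, 2) + pow({t1}_PZ + {t2}_PZ + {t3}_PZ,2)))"
--             name_list.append(name)
--             form_list.append(form)
--     return name_list, form_list;
-- ===== SOURCE B (Python) =====
-- def build_track_strings(tl, n, tag):
--     name_list = []
--     form_list = []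
--     if n in (2, 3):
--         for i in tl:
--             parts = [i[j] for j in range(n)]
--             pe = " + ".join(f"{t}_PE" for t in parts)
--             px = " + ".join(f"{t}_PX" for t in parts)
--             py = " + ".join(f"{t}_PY" for t in parts)
--             pz = " + ".join(f"{t}_PZ" for t in parts)
--             name_list.append("_".join(parts) + f"_M_{tag}")
--             form_list.append(f"sqrt( pow({pe}, 2) - ( pow({px},2) + pow({py}, 2) + pow({pz},2)))")
--     return name_list, form_list
-- ===== Notes on version B (the rewrite author's own statement) =====
-- stated objective: simpler
-- what changed: The two near-identical n==2 and n==3 branches are replaced by one parametric loop: parts = [i[j] for j in range(n)] and the name/formula strings are assembled with join over parts instead of hand-written two- and three-track f-strings.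
import Mathlib
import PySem

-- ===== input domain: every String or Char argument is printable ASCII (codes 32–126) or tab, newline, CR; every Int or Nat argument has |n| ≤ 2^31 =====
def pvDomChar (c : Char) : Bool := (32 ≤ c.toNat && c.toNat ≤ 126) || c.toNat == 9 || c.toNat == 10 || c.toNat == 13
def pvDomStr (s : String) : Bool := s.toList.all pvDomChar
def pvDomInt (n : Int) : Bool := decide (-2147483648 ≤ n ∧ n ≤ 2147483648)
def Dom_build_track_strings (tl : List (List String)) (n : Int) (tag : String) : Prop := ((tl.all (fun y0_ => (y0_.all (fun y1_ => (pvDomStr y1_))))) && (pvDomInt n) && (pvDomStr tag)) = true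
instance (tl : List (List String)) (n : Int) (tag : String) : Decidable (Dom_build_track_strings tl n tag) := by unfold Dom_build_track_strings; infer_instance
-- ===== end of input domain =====

-- B replaces the two near-identical n==2/n==3 branches by ONE parametric loop
-- (parts = [i[j] for j in range(n)], strings built with join); objective: simpler.

-- ===== PORT A =====
-- A's loop bodies; f-string concatenation is ported as PySem.Str.join "" [...] (exact).
def pvBodyA2 (tag : String) (acc : List String × List String) (i : List String) :
    List String × List String :=
  let t1 := PySem.List.pyGetD i 0 ""   -- i[0]; Pre_ keeps the index in range
  let t2 := PySem.List.pyGetD i 1 ""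
  let name := PySem.Str.join "" [t1, "_", t2, "_M_", tag]
  let form := PySem.Str.join "" ["sqrt( pow(", t1, "_PE + ", t2, "_PE, 2) - ( pow(", t1,
    "_PX + ", t2, "_PX,2) + pow(", t1, "_PY + ", t2, "_PY, 2) + pow(", t1, "_PZ + ", t2, "_PZ,2)))"]
  (acc.1 ++ [name], acc.2 ++ [form])

def pvBodyA3 (tag : String) (acc : List String × List String) (i : List String) :
    List String × List String :=
  let t1 := PySem.List.pyGetD i 0 ""
  let t2 := PySem.List.pyGetD i 1 ""
  let t3 := PySem.List.pyGetD i 2 ""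
  let name := PySem.Str.join "" [t1, "_", t2, "_", t3, "_M_", tag]
  let form := PySem.Str.join "" ["sqrt( pow(", t1, "_PE + ", t2, "_PE + ", t3, "_PE, 2) - ( pow(",
    t1, "_PX + ", t2, "_PX + ", t3, "_PX,2) + pow(", t1, "_PY + ", t2, "_PY + ", t3,
    "_PY, 2) + pow(", t1, "_PZ + ", t2, "_PZ + ", t3, "_PZ,2)))"]
  (acc.1 ++ [name], acc.2 ++ [form])

def build_track_strings (tl : List (List String)) (n : Int) (tag : String) :
    List String × List String :=
  let acc0 : List String × List String := ([], [])
  let acc1 := if n = 2 then tl.foldl (pvBodyA2 tag) acc0 else acc0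
  if n = 3 then tl.foldl (pvBodyA3 tag) acc1 else acc1

-- ===== PORT B =====
-- B's single parametric loop body: parts = [i[j] for j in range(n)]
def pvBodyB (n : Int) (tag : String) (acc : List String × List String) (i : List String) :
    List String × List String :=
  let parts := (PySem.List.pyRange 0 n 1).map (fun j => PySem.List.pyGetD i j "")
  let pe := PySem.Str.join " + " (parts.map (fun t => PySem.Str.join "" [t, "_PE"]))
  let px := PySem.Str.join " + " (parts.map (fun t => PySem.Str.join "" [t, "_PX"]))
  let py := PySem.Str.join " + " (parts.map (fun t => PySem.Str.join "" [t, "_PY"]))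
  let pz := PySem.Str.join " + " (parts.map (fun t => PySem.Str.join "" [t, "_PZ"]))
  let name := PySem.Str.join "" [PySem.Str.join "_" parts, "_M_", tag]
  let form := PySem.Str.join "" ["sqrt( pow(", pe, ", 2) - ( pow(", px, ",2) + pow(", py,
    ", 2) + pow(", pz, ",2)))"]
  (acc.1 ++ [name], acc.2 ++ [form])

def build_track_strings_alt (tl : List (List String)) (n : Int) (tag : String) :
    List String × List String :=
  if n = 2 ∨ n = 3 then tl.foldl (pvBodyB n tag) ([], []) else ([], [])

-- ===== PRECONDITION & SPEC =====
-- Pre_ excludes exactly the inputs where A raises IndexError: n = 2 (resp. 3) with some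
-- tuple shorter than 2 (resp. 3). B raises IndexError there as well.
def Pre_build_track_strings (tl : List (List String)) (n : Int) (tag : String) : Prop :=
  (n = 2 → ∀ i ∈ tl, 2 ≤ i.length) ∧ (n = 3 → ∀ i ∈ tl, 3 ≤ i.length)
instance (tl : List (List String)) (n : Int) (tag : String) : Decidable (Pre_build_track_strings tl n tag) := by unfold Pre_build_track_strings; infer_instance
def pvWitness_build_track_strings : List (List String) × Int × String := ([["K", "pi"]], 2, "B0")

def Spec_build_track_strings (tl : List (List String)) (n : Int) (tag : String) (out : List String × List String) : Prop := out = build_track_strings_alt tl n tag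
instance (tl : List (List String)) (n : Int) (tag : String) (out : List String × List String) : Decidable (Spec_build_track_strings tl n tag out) := by unfold Spec_build_track_strings; infer_instance

-- ===== CLAIM (what is proved, stated in full; the proofs are below) =====
def Claim_equal_build_track_strings : Prop := ∀ (tl : List (List String)) (n : Int) (tag : String), Dom_build_track_strings tl n tag → Pre_build_track_strings tl n tag → Spec_build_track_strings tl n tag (build_track_strings tl n tag)

-- ===== LEMMAS AND PROOFS =====
theorem pvBody2_eq (tag : String) (i : List String) (h : 2 ≤ i.length)
    (acc : List String × List String) : pvBodyA2 tag acc i = pvBodyB 2 tag acc i := by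
  obtain ⟨a, b, r, rfl⟩ : ∃ a b r, i = a :: b :: r := by
    match i, h with | a :: b :: r, _ => exact ⟨a, b, r, rfl⟩
  show (_, _) = (_, _)
  simp [PySem.List.pyGetD,
    show PySem.List.pyRange 0 2 1 = [0, 1] from by decide,
    PySem.Str.join, PySem.Chars.join, List.intercalate]

theorem pvBody3_eq (tag : String) (i : List String) (h : 3 ≤ i.length)
    (acc : List String × List String) : pvBodyA3 tag acc i = pvBodyB 3 tag acc i := by
  obtain ⟨a, b, c, r, rfl⟩ : ∃ a b c r, i = a :: b :: c :: r := by
    match i, h with | a :: b :: c :: r, _ => exact ⟨a, b, c, r, rfl⟩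
  show (_, _) = (_, _)
  simp [PySem.List.pyGetD,
    show PySem.List.pyRange 0 3 1 = [0, 1, 2] from by decide,
    PySem.Str.join, PySem.Chars.join, List.intercalate]

-- ===== VERDICT (by name: the statement is the Claim_ definition above) =====
theorem build_track_strings_spec : Claim_equal_build_track_strings := by
  intro tl n tag _hdom hpre
  unfold Spec_build_track_strings build_track_strings build_track_strings_alt
  by_cases h2 : n = 2
  · subst h2
    simp only [if_neg (by decide : ¬ (2:Int) = 3)]
    apply PySem.List.foldl_congr_mem
    intro acc x hx
    exact pvBody2_eq tag x (hpre.1 rfl x hx) acc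
  · by_cases h3 : n = 3
    · subst h3
      simp only [if_neg (by decide : ¬ (3:Int) = 2)]
      apply PySem.List.foldl_congr_mem
      intro acc x hx
      exact pvBody3_eq tag x (hpre.2 rfl x hx) acc
    · simp [h2, h3]
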